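-- pv_equiv track=rewrite | github.com/kamlesa/FYP_2025 | survey_pipeline.py | map_concerns_from_keywords
-- ===== SOURCE A (Python) =====
-- CONCERN_LEXICON = {
--     "privacy":        ["privacy", "surveillance", "tracking", "mass surveillance", "data collection"],
--     "bias":           ["bias", "discrimination", "fairness", "racial profiling", "inequity", "unfair"],
--     "transparency":   ["transparency", "transparent", "explainable", "explainability", "opaque", "black box", "explanation"],
--     "accountability": ["accountability", "oversight", "appeal", "redress", "governance", "audit"],
--     "data_misuse":    ["misuse", "data breach", "leak", "unauthorised access", "security", "hacked"],
--     "accessibility":  ["accessibility", "accessible", "usable", "usability", "readable", "inclusive", "screen reader"]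
-- }
--
-- def map_concerns_from_keywords(keywords):
--     """keywords can be list[str] or list[(kw,score)] -> returns dict concern->count"""
--     if keywords and isinstance(keywords[0], tuple):
--         words = [k for k, _ in keywords]
--     else:
--         words = keywords or []
--     hay = " " + " ".join(words).lower() + " "
--     hits = {c:0 for c in CONCERN_LEXICON}
--     for concern, lex in CONCERN_LEXICON.items():
--         for term in lex:
--             if f" {term.lower()} " in hay:
--                 hits[concern] += 1
--     return {k:v for k,v in hits.items() if v>0}
-- ===== SOURCE B (Python) =====
-- CONCERN_LEXICON = {
--     "privacy":        ["privacy", "surveillance", "tracking", "mass surveillance", "data collection"],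
--     "bias":           ["bias", "discrimination", "fairness", "racial profiling", "inequity", "unfair"],
--     "transparency":   ["transparency", "transparent", "explainable", "explainability", "opaque", "black box", "explanation"],
--     "accountability": ["accountability", "oversight", "appeal", "redress", "governance", "audit"],
--     "data_misuse":    ["misuse", "data breach", "leak", "unauthorised access", "security", "hacked"],
--     "accessibility":  ["accessibility", "accessible", "usable", "usability", "readable", "inclusive", "screen reader"]
-- }
--
-- def map_concerns_from_keywords(keywords):
--     """keywords can be list[str] or list[(kw,score)] -> returns dict concern->count"""
--     if keywords and isinstance(keywords[0], tuple):
--         words = [k for k, _ in keywords]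
--     else:
--         words = keywords or []
--     # index the text once: every 1- and 2-token space-joined n-gram
--     tokens = " ".join(words).lower().split(" ")
--     grams = set(tokens)
--     grams.update(a + " " + b for a, b in zip(tokens, tokens[1:]))
--     out = {}
--     for concern, lex in CONCERN_LEXICON.items():
--         n = len([term for term in lex if term.lower() in grams])
--         if 0 < n:
--             out[concern] = n
--     return out
-- ===== Notes on version B (the rewrite author's own statement) =====
-- stated objective: alternative
-- what changed: Instead of scanning the joined padded text once per lexicon term with a substring search, B tokenizes the text once, builds a set index of every 1- and 2-token space-joined n-gram, and tests each term by set membership; the result dict is built directly instead of init-to-zero then filtered.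
import Mathlib
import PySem

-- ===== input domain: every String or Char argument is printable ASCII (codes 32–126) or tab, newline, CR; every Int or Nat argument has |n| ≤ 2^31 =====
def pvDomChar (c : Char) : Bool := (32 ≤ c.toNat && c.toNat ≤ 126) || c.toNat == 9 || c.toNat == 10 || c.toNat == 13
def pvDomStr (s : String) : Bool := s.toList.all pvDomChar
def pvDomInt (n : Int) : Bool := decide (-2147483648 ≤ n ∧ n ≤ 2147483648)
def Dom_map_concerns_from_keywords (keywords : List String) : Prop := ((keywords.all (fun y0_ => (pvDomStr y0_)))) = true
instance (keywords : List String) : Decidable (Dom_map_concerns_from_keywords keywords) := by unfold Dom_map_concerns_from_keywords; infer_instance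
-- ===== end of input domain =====

-- B replaces A's per-term padded-substring scans of the joined text by building a set of all
-- 1- and 2-token n-grams once and testing each lexicon term by set membership (alternative algorithm;
-- not claimed faster).

def CONCERN_LEXICON : List (String × List String) :=
  [("privacy",        ["privacy", "surveillance", "tracking", "mass surveillance", "data collection"]),
   ("bias",           ["bias", "discrimination", "fairness", "racial profiling", "inequity", "unfair"]),
   ("transparency",   ["transparency", "transparent", "explainable", "explainability", "opaque", "black box", "explanation"]),
   ("accountability", ["accountability", "oversight", "appeal", "redress", "governance", "audit"]),
   ("data_misuse",    ["misuse", "data breach", "leak", "unauthorised access", "security", "hacked"]),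
   ("accessibility",  ["accessibility", "accessible", "usable", "usability", "readable", "inclusive", "screen reader"])]

-- ===== PORT A =====
-- keywords : list[str] here, so the isinstance-tuple branch never fires and `keywords or []`
-- is `keywords` (an empty list stays empty).
def map_concerns_from_keywords (keywords : List String) : List (String × Int) :=
  let words := keywords
  let hay := " " ++ PySem.Str.lower (PySem.Str.join " " words) ++ " "
  -- hits = {c: 0 for c in CONCERN_LEXICON}
  let hits : PySem.Dict String Int :=
    CONCERN_LEXICON.foldl (fun d cl => d.insert cl.1 0) PySem.Dict.empty
  -- nested for-loops; hits[concern] += 1 (key always present, so modify with default 0 is exact)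
  let hits :=
    CONCERN_LEXICON.foldl (fun d cl =>
      cl.2.foldl (fun d term =>
        if PySem.Str.isIn (" " ++ PySem.Str.lower term ++ " ") hay
        then d.modify cl.1 0 (· + 1) else d) d) hits
  -- {k: v for k, v in hits.items() if v > 0}
  (hits.items.foldl (fun d kv => if 0 < kv.2 then d.insert kv.1 kv.2 else d)
    PySem.Dict.empty).items

-- ===== PORT B =====
def map_concerns_from_keywords_alt (keywords : List String) : List (String × Int) :=
  let words := keywords
  -- tokens = " ".join(words).lower().split(" ")   (sep " " is nonempty, so split? never raises)
  let tokens : List String :=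
    (PySem.Str.split? (PySem.Str.lower (PySem.Str.join " " words)) " ").getD []
  -- grams = set(tokens); grams.update(a + " " + b for a, b in zip(tokens, tokens[1:]))
  let grams : PySem.Set String :=
    PySem.Set.update (PySem.Set.ofList tokens)
      ((tokens.zip (PySem.List.slice tokens (some 1))).map (fun ab => ab.1 ++ " " ++ ab.2))
  -- out = {}; for concern, lex in CONCERN_LEXICON.items(): … ; returned as the assoc list it builds
  CONCERN_LEXICON.foldl (fun out cl =>
    let n : Int := ((cl.2.filter (fun term => PySem.Set.contains grams (PySem.Str.lower term))).length : Int)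
    if 0 < n then out ++ [(cl.1, n)] else out) []

-- ===== PRECONDITION & SPEC =====
def Spec_map_concerns_from_keywords (keywords : List String) (out : List (String × Int)) : Prop := out = map_concerns_from_keywords_alt keywords
instance (keywords : List String) (out : List (String × Int)) : Decidable (Spec_map_concerns_from_keywords keywords out) := by unfold Spec_map_concerns_from_keywords; infer_instance

-- ===== CLAIM (what is proved, stated in full; the proofs are below) =====
def Claim_equal_map_concerns_from_keywords : Prop := ∀ (keywords : List String), Dom_map_concerns_from_keywords keywords → Spec_map_concerns_from_keywords keywords (map_concerns_from_keywords keywords)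

-- ===== LEMMAS AND PROOFS =====

-- ---- a simple structural model of s.split(" ") ----
def mySplit : List Char → List (List Char)
  | [] => [[]]
  | c :: rest =>
    if c = ' ' then [] :: mySplit rest
    else
      match mySplit rest with
      | [] => [[c]]
      | t :: ts => (c :: t) :: ts

theorem mySplit_ne_nil (s : List Char) : mySplit s ≠ [] := by
  induction s with
  | nil => simp [mySplit]
  | cons c rest ih =>
    simp only [mySplit]
    split
    · simp
    · cases h : mySplit rest <;> simp

theorem splitOn_go_spec (fuel : Nat) :
    ∀ (l : List Char), l.length < fuel → ∀ (cur : List Char) (acc : List (List Char)),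
      PySem.Chars.splitOn.go [' '] fuel l cur acc =
        acc.reverse ++
          (match mySplit l with
           | [] => []
           | t :: ts => (cur.reverse ++ t) :: ts) := by
  induction fuel with
  | zero => intro l hl; omega
  | succ fuel ih =>
    intro l hl cur acc
    cases l with
    | nil =>
      rw [PySem.Chars.splitOn.go.eq_def]
      simp [mySplit]
    | cons c rest =>
      have hfuel : rest.length < fuel := by simp at hl; omega
      by_cases hc : c = ' '
      · subst hc
        have hp : [' '].isPrefixOf (' ' :: rest) = true := by simp [List.isPrefixOf]
        have hrec := ih rest hfuel [] (cur.reverse :: acc)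
        cases h : mySplit rest with
        | nil => exact absurd h (mySplit_ne_nil rest)
        | cons t ts =>
          rw [h] at hrec
          rw [PySem.Chars.splitOn.go.eq_def]
          simp [hp, hrec, mySplit, h]
      · have hp : [' '].isPrefixOf (c :: rest) = false := by
          simp [List.isPrefixOf]
          exact fun h => hc h.symm
        have hrec := ih rest hfuel (c :: cur) acc
        cases h : mySplit rest with
        | nil => exact absurd h (mySplit_ne_nil rest)
        | cons t ts =>
          rw [h] at hrec
          rw [PySem.Chars.splitOn.go.eq_def]
          simp [hp, hrec, mySplit, hc, h]

theorem splitOn_eq_mySplit (s : List Char) : PySem.Chars.splitOn s [' '] = mySplit s := by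
  unfold PySem.Chars.splitOn
  rw [splitOn_go_spec (s.length + 1) s (by omega) [] []]
  cases h : mySplit s with
  | nil => exact absurd h (mySplit_ne_nil s)
  | cons t ts => simp

theorem mySplit_append_space (x y : List Char) :
    mySplit (x ++ ' ' :: y) = mySplit x ++ mySplit y := by
  induction x with
  | nil => simp [mySplit]
  | cons c x ih =>
    by_cases hc : c = ' '
    · subst hc; simp [mySplit, ih]
    · simp only [List.cons_append, mySplit, if_neg hc, ih]
      cases h : mySplit x with
      | nil => exact absurd h (mySplit_ne_nil x)
      | cons t ts => simp

theorem mySplit_no_space (s : List Char) : ∀ t ∈ mySplit s, ' ' ∉ t := by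
  induction s with
  | nil => simp [mySplit]
  | cons c rest ih =>
    by_cases hc : c = ' '
    · subst hc; simp [mySplit]; exact ih
    · simp only [mySplit, if_neg hc]
      cases h : mySplit rest with
      | nil => exact absurd h (mySplit_ne_nil rest)
      | cons t ts =>
        intro u hu
        rcases List.mem_cons.mp hu with rfl | hu
        · intro hmem
          rcases List.mem_cons.mp hmem with h' | h'
          · exact hc h'.symm
          · exact ih t (h ▸ List.mem_cons_self ..) h'
        · exact ih u (h ▸ List.mem_cons_of_mem _ hu)

theorem mySplit_of_no_space (s : List Char) (h : ' ' ∉ s) : mySplit s = [s] := by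
  induction s with
  | nil => simp [mySplit]
  | cons c rest ih =>
    have hc : c ≠ ' ' := fun hh => h (hh ▸ List.mem_cons_self ..)
    have hr : ' ' ∉ rest := fun hh => h (List.mem_cons_of_mem _ hh)
    simp [mySplit, if_neg hc, ih hr]

theorem join_cons (sep t : List Char) (ts : List (List Char)) :
    PySem.Chars.join sep (t :: ts) =
      t ++ (match ts with | [] => [] | _ :: _ => sep ++ PySem.Chars.join sep ts) := by
  cases ts with
  | nil => simp [PySem.Chars.join_singleton]
  | cons q rest => simpa using PySem.Chars.join_cons_cons sep t q rest

theorem join_mySplit (s : List Char) : PySem.Chars.join [' '] (mySplit s) = s := by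
  induction s with
  | nil => simp [mySplit, PySem.Chars.join_singleton]
  | cons c rest ih =>
    by_cases hc : c = ' '
    · subst hc
      cases h2 : mySplit rest with
      | nil => exact absurd h2 (mySplit_ne_nil rest)
      | cons t ts =>
        have ih' := ih; rw [h2] at ih'
        rw [show mySplit (' ' :: rest) = [] :: t :: ts by simp [mySplit, h2],
            PySem.Chars.join_cons_cons, ih']
        simp
    · cases h2 : mySplit rest with
      | nil => exact absurd h2 (mySplit_ne_nil rest)
      | cons t ts =>
        have ih' := ih; rw [h2] at ih'
        rw [show mySplit (c :: rest) = (c :: t) :: ts by simp [mySplit, hc, h2]]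
        cases ts with
        | nil =>
          rw [PySem.Chars.join_singleton]
          rw [PySem.Chars.join_singleton] at ih'
          rw [ih']
        | cons q ts' =>
          rw [PySem.Chars.join_cons_cons]
          rw [PySem.Chars.join_cons_cons] at ih'
          rw [← ih']
          simp

theorem mySplit_join (ts : List (List Char)) (hne : ts ≠ [])
    (hsp : ∀ t ∈ ts, ' ' ∉ t) :
    mySplit (PySem.Chars.join [' '] ts) = ts := by
  induction ts with
  | nil => exact absurd rfl hne
  | cons t rest ih =>
    cases rest with
    | nil =>
      rw [join_cons]
      simp [mySplit_of_no_space t (hsp t (List.mem_cons_self ..))]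
    | cons q rest' =>
      rw [join_cons]
      simp only [List.singleton_append]
      rw [mySplit_append_space]
      rw [mySplit_of_no_space t (hsp t (List.mem_cons_self ..))]
      rw [ih (by simp) (fun u hu => hsp u (List.mem_cons_of_mem _ hu))]
      simp

theorem join_append_ne (a ts : List (List Char)) (ha : a ≠ []) (hts : ts ≠ []) :
    PySem.Chars.join [' '] (a ++ ts) =
      PySem.Chars.join [' '] a ++ ' ' :: PySem.Chars.join [' '] ts := by
  induction a with
  | nil => exact absurd rfl ha
  | cons x a' ih =>
    cases a' with
    | nil =>
      cases ts with
      | nil => exact absurd rfl hts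
      | cons q r =>
        simp only [List.nil_append, List.singleton_append]
        rw [PySem.Chars.join_cons_cons, PySem.Chars.join_singleton]
        simp
    | cons y a'' =>
      simp only [List.cons_append]
      rw [PySem.Chars.join_cons_cons]
      have ih' := ih (by simp)
      simp only [List.cons_append] at ih'
      rw [ih']
      rw [PySem.Chars.join_cons_cons]
      simp [List.append_assoc]

-- the central combinatorial fact: padded-substring matching IS contiguous-token matching
theorem main_infix (S : List Char) (ts : List (List Char)) (hne : ts ≠ [])
    (hsp : ∀ t ∈ ts, ' ' ∉ t) :
    ((' ' :: PySem.Chars.join [' '] ts ++ [' ']) <:+: (' ' :: S ++ [' '])) ↔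
      ts <:+: mySplit S := by
  constructor
  · rintro ⟨u, v, huv⟩
    have hone : u ++ (' ' :: PySem.Chars.join [' '] ts ++ [' ']) ++ v
        = u ++ ' ' :: (PySem.Chars.join [' '] ts ++ ' ' :: v) := by simp
    rw [hone] at huv
    have hbig := congrArg mySplit huv
    rw [mySplit_append_space, mySplit_append_space, mySplit_join ts hne hsp] at hbig
    have h2 : mySplit (' ' :: S ++ [' ']) = [] :: (mySplit S ++ [[]]) := by
      have hx : (' ' :: S ++ [' ']) = [] ++ ' ' :: (S ++ ' ' :: []) := by simp
      rw [hx, mySplit_append_space, mySplit_append_space]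
      simp [mySplit]
    rw [h2] at hbig
    rcases hu : mySplit u with _ | ⟨hu0, tu⟩
    · exact absurd hu (mySplit_ne_nil u)
    rw [hu] at hbig
    simp only [List.cons_append] at hbig
    obtain ⟨-, hbig⟩ := List.cons.inj hbig
    rcases List.eq_nil_or_concat (mySplit v) with hv | ⟨wv, lv, hv⟩
    · exact absurd hv (mySplit_ne_nil v)
    rw [hv, List.concat_eq_append] at hbig
    have hbig' : (tu ++ ts ++ wv) ++ [lv] = mySplit S ++ [[]] := by
      rw [← hbig]; simp [List.append_assoc]
    obtain ⟨h3, -⟩ := List.append_inj' hbig' (by simp)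
    exact ⟨tu, wv, h3⟩
  · rintro ⟨a, b, hab⟩
    cases a with
    | nil =>
      cases b with
      | nil =>
        simp only [List.nil_append, List.append_nil] at hab
        have hS : PySem.Chars.join [' '] ts = S := by rw [hab, join_mySplit]
        refine ⟨[], [], ?_⟩
        rw [← hS]
        simp
      | cons b0 b' =>
        simp only [List.nil_append] at hab
        have hS : PySem.Chars.join [' '] (ts ++ b0 :: b') = S := by rw [hab, join_mySplit]
        rw [join_append_ne ts (b0 :: b') hne (by simp)] at hS
        refine ⟨[], PySem.Chars.join [' '] (b0 :: b') ++ [' '], ?_⟩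
        rw [← hS]
        simp [List.append_assoc]
    | cons a0 a' =>
      cases b with
      | nil =>
        simp only [List.append_nil] at hab
        have hS : PySem.Chars.join [' '] (a0 :: a' ++ ts) = S := by rw [hab, join_mySplit]
        rw [join_append_ne (a0 :: a') ts (by simp) hne] at hS
        refine ⟨' ' :: PySem.Chars.join [' '] (a0 :: a'), [], ?_⟩
        rw [← hS]
        simp [List.append_assoc]
      | cons b0 b' =>
        have hS : PySem.Chars.join [' '] (a0 :: a' ++ ts ++ b0 :: b') = S := by
          rw [hab, join_mySplit]
        rw [join_append_ne (a0 :: a' ++ ts) (b0 :: b') (by simp) (by simp)] at hS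
        rw [join_append_ne (a0 :: a') ts (by simp) hne] at hS
        refine ⟨' ' :: PySem.Chars.join [' '] (a0 :: a'),
               PySem.Chars.join [' '] (b0 :: b') ++ [' '], ?_⟩
        rw [← hS]
        simp [List.append_assoc]

theorem pair_infix {α : Type} (a b : α) (l : List α) :
    ([a, b] <:+: l) ↔ (a, b) ∈ l.zip (l.drop 1) := by
  induction l with
  | nil =>
    constructor
    · rintro ⟨u, v, h⟩; simp at h
    · intro h; simp at h
  | cons x l' ih =>
    constructor
    · intro h
      rcases List.infix_cons_iff.mp h with hpre | hinf
      · rcases hpre with ⟨t, ht⟩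
        cases l' with
        | nil => simp at ht
        | cons y l'' =>
          simp only [List.cons_append, List.nil_append] at ht
          obtain ⟨rfl, ht2⟩ := List.cons.inj ht
          obtain ⟨rfl, -⟩ := List.cons.inj ht2
          simp [List.zip_cons_cons]
      · cases l' with
        | nil =>
          rcases hinf with ⟨u, v, hh⟩
          simp at hh
        | cons y l'' =>
          have hb := ih.mp hinf
          simp only [List.drop_succ_cons, List.drop_zero] at hb ⊢
          rw [List.zip_cons_cons]
          exact List.mem_cons_of_mem _ hb
    · intro h
      cases l' with
      | nil => simp at h
      | cons y l'' =>
        simp only [List.drop_succ_cons, List.drop_zero, List.zip_cons_cons,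
          List.mem_cons] at h
        rcases h with h | h
        · rw [Prod.mk.injEq] at h
          obtain ⟨rfl, rfl⟩ := h
          exact List.infix_cons_iff.mpr (Or.inl ⟨l'', rfl⟩)
        · refine List.infix_cons_iff.mpr (Or.inr (ih.mpr ?_))
          simpa using h

theorem unique_split : ∀ (x a y b : List Char), ' ' ∉ x → ' ' ∉ a →
    x ++ ' ' :: y = a ++ ' ' :: b → x = a ∧ y = b := by
  intro x
  induction x with
  | nil =>
    intro a y b hx ha h
    cases a with
    | nil => simpa using h
    | cons c a' =>
      simp only [List.nil_append, List.cons_append] at h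
      obtain ⟨h1, -⟩ := List.cons.inj h
      exact absurd (h1 ▸ List.mem_cons_self ..) ha
  | cons c x' ih =>
    intro a y b hx ha h
    cases a with
    | nil =>
      simp only [List.nil_append, List.cons_append] at h
      obtain ⟨h1, -⟩ := List.cons.inj h
      exact absurd (h1.symm ▸ List.mem_cons_self ..) hx
    | cons d a' =>
      simp only [List.cons_append] at h
      obtain ⟨h1, h2⟩ := List.cons.inj h
      obtain ⟨h3, h4⟩ := ih a' y b (fun hh => hx (List.mem_cons_of_mem _ hh))
        (fun hh => ha (List.mem_cons_of_mem _ hh)) h2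
      exact ⟨by rw [h1, h3], h4⟩

-- ---- bridging B's string-level grams to mySplit ----
def toks (S : List Char) : List String := (mySplit S).map String.ofList

theorem tokens_eq (s : String) :
    (PySem.Str.split? s " ").getD [] = toks s.toList := by
  have h := PySem.Str.split?_map s " "
  have hsep : (" " : String).toList = [' '] := rfl
  rw [hsep] at h
  simp only [PySem.Chars.split?, List.isEmpty] at h
  rw [splitOn_eq_mySplit] at h
  rcases ho : PySem.Str.split? s " " with _ | ts
  · rw [ho] at h; simp at h
  · rw [ho] at h
    simp only [Option.map_some] at h
    have hts : List.map String.toList ts = mySplit s.toList := by simpa using h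
    simp only [Option.getD_some]
    rw [toks, ← hts]
    simp [List.map_map, Function.comp_def]

theorem set_mem_update {α : Type} [BEq α] [LawfulBEq α] (s : PySem.Set α) (xs : List α) (y : α) :
    y ∈ PySem.Set.update s xs ↔ y ∈ s ∨ y ∈ xs := by
  induction xs generalizing s with
  | nil => simp [PySem.Set.update]
  | cons x xs ih =>
    simp only [PySem.Set.update, List.foldl_cons] at *
    rw [ih (s.add x)]
    rw [PySem.Set.mem_add]
    simp [List.mem_cons]
    tauto

def gramsOf (S : List Char) : PySem.Set String :=
  PySem.Set.update (PySem.Set.ofList (toks S))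
    (((toks S).zip (PySem.List.slice (toks S) (some 1))).map (fun ab => ab.1 ++ " " ++ ab.2))

theorem mem_gramsOf (S : List Char) (w : String) :
    w ∈ gramsOf S ↔
      (w.toList ∈ mySplit S ∨
        ∃ p ∈ (mySplit S).zip ((mySplit S).drop 1), w.toList = p.1 ++ ' ' :: p.2) := by
  have hspc : (" " : String).toList = [' '] := rfl
  rw [gramsOf, set_mem_update, PySem.Set.mem_ofList]
  rw [PySem.List.slice_from _ (by norm_num)]
  rw [show ((1 : Int)).toNat = 1 from rfl]
  have h1 : w ∈ toks S ↔ w.toList ∈ mySplit S := by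
    rw [toks]
    constructor
    · intro h
      rcases List.mem_map.mp h with ⟨u, hu, rfl⟩
      simpa using hu
    · intro h
      exact List.mem_map.mpr ⟨w.toList, h, by simp⟩
  rw [h1]
  have h2 : (toks S).zip ((toks S).drop 1) =
      ((mySplit S).zip ((mySplit S).drop 1)).map
        (Prod.map String.ofList String.ofList) := by
    rw [toks, ← List.map_drop, List.zip_map]
  rw [h2]
  constructor
  · rintro (h | h)
    · exact Or.inl h
    · right
      rcases List.mem_map.mp h with ⟨q, hq, hqw⟩
      rcases List.mem_map.mp hq with ⟨p, hp, rfl⟩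
      refine ⟨p, hp, ?_⟩
      rw [← hqw]
      cases p with
      | mk p1 p2 => simp [Prod.map, hspc]
  · rintro (h | h)
    · exact Or.inl h
    · right
      rcases h with ⟨p, hp, hw⟩
      apply List.mem_map.mpr
      refine ⟨Prod.map String.ofList String.ofList p, List.mem_map.mpr ⟨p, hp, rfl⟩, ?_⟩
      apply String.toList_inj.mp
      cases p with
      | mk p1 p2 =>
        simp only [Prod.map] at hw ⊢
        simp [hspc, hw]

theorem contains_iff {α : Type} [BEq α] [LawfulBEq α] (s : PySem.Set α) (x : α) :
    PySem.Set.contains s x = true ↔ x ∈ s := by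
  simp [PySem.Set.contains]

-- the master per-term equality: for a term whose lowered text splits into at most two tokens,
-- A's padded-substring test equals B's n-gram-set membership test
theorem test_master (S : List Char) (w : String)
    (h2 : (mySplit w.toList).length = 1 ∨ (mySplit w.toList).length = 2) :
    PySem.Chars.isIn (' ' :: w.toList ++ [' ']) (' ' :: S ++ [' ']) =
      PySem.Set.contains (gramsOf S) w := by
  rw [Bool.eq_iff_iff, PySem.Chars.isIn_iff_infix, contains_iff, mem_gramsOf]
  have hw : w.toList = PySem.Chars.join [' '] (mySplit w.toList) := (join_mySplit _).symm
  have hsp := mySplit_no_space w.toList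
  rcases h2 with h2 | h2
  · rcases hx : mySplit w.toList with _ | ⟨x, ts⟩
    · exact absurd hx (mySplit_ne_nil _)
    rw [hx] at h2
    have hts : ts = [] := by simpa using h2
    subst hts
    have hwx : w.toList = x := by
      rw [hw, hx, PySem.Chars.join_singleton]
    have hxs : ' ' ∉ x := hsp x (hx ▸ List.mem_cons_self ..)
    rw [hwx]
    rw [show (' ' :: x ++ [' ']) = ' ' :: PySem.Chars.join [' '] [x] ++ [' '] by
      rw [PySem.Chars.join_singleton]]
    rw [main_infix S [x] (by simp) (by intro t ht; simp at ht; subst ht; exact hxs)]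
    rw [List.singleton_infix_iff]
    constructor
    · exact Or.inl
    · rintro (h | ⟨p, hp, hpx⟩)
      · exact h
      · exact absurd (by rw [hpx]; simp) hxs
  · rcases hx : mySplit w.toList with _ | ⟨x, ts⟩
    · exact absurd hx (mySplit_ne_nil _)
    rcases ts with _ | ⟨y, ts'⟩
    · rw [hx] at h2; simp at h2
    have hts' : ts' = [] := by rw [hx] at h2; simpa using h2
    subst hts'
    have hwxy : w.toList = x ++ ' ' :: y := by
      rw [hw, hx, PySem.Chars.join_cons_cons, PySem.Chars.join_singleton]
      simp
    have hxs : ' ' ∉ x := hsp x (hx ▸ List.mem_cons_self ..)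
    have hys : ' ' ∉ y := hsp y (hx ▸ List.mem_cons_of_mem _ (List.mem_cons_self ..))
    rw [hwxy]
    rw [show (' ' :: (x ++ ' ' :: y) ++ [' ']) = ' ' :: PySem.Chars.join [' '] [x, y] ++ [' '] by
      rw [PySem.Chars.join_cons_cons, PySem.Chars.join_singleton]; simp]
    rw [main_infix S [x, y] (by simp)
      (by intro t ht; simp at ht; rcases ht with rfl | rfl; exacts [hxs, hys])]
    rw [pair_infix]
    constructor
    · intro h
      exact Or.inr ⟨(x, y), h, rfl⟩
    · rintro (h | ⟨⟨p1, p2⟩, hp, hpxy⟩)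
      · exact absurd (by simp : ' ' ∈ x ++ ' ' :: y) (mySplit_no_space S _ h)
      · have hp1 : ' ' ∉ p1 := mySplit_no_space S p1 (List.of_mem_zip hp).1
        obtain ⟨rfl, rfl⟩ := unique_split x p1 y p2 hxs hp1 hpxy
        exact hp

-- ---- A's dict bookkeeping, reduced to per-concern counts ----
theorem inner_getD (c : String) (p : String → Bool) (lex : List String) :
    ∀ (d : PySem.Dict String Int) (c' : String),
      (lex.foldl (fun d term => if p term then d.modify c 0 (· + 1) else d) d).getD c' 0 =
        if c' = c then d.getD c 0 + (lex.countP p : Int) else d.getD c' 0 := by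
  induction lex with
  | nil =>
    intro d c'
    simp only [List.foldl_nil, List.countP_nil, Nat.cast_zero, add_zero]
    by_cases hc : c' = c
    · rw [if_pos hc, hc]
    · rw [if_neg hc]
  | cons t lex ih =>
    intro d c'
    simp only [List.foldl_cons]
    by_cases hp : p t
    · rw [if_pos hp, ih]
      simp only [PySem.Dict.getD_modify]
      by_cases hc : c' = c
      · subst hc
        simp [hp, List.countP_cons]
        push_cast
        ring
      · simp [hc]
    · rw [if_neg hp, ih]
      simp [hp, List.countP_cons]

theorem inner_keys (c : String) (p : String → Bool) (lex : List String) :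
    ∀ (d : PySem.Dict String Int), d.contains c = true →
    (lex.foldl (fun d term => if p term then d.modify c 0 (· + 1) else d) d).keys = d.keys := by
  induction lex with
  | nil => intro d _; rfl
  | cons t lex ih =>
    intro d hc
    simp only [List.foldl_cons]
    by_cases hp : p t
    · rw [if_pos hp]
      rw [ih _ (by rw [PySem.Dict.contains_modify]; simp [hc])]
      rw [PySem.Dict.keys_modify, PySem.Dict.keys_insert_of_contains _ _ hc]
    · rw [if_neg hp, ih _ hc]

def cntOf (p : String → Bool) (lex : List String) : Int := (lex.countP p : Int)

theorem outer_getD (p : String → Bool) (ls : List (String × List String)) :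
    ∀ (d : PySem.Dict String Int) (c : String),
      (ls.foldl (fun d cl =>
          cl.2.foldl (fun d term => if p term then d.modify cl.1 0 (· + 1) else d) d) d).getD c 0 =
        d.getD c 0 + (ls.map (fun cl => if c = cl.1 then cntOf p cl.2 else 0)).sum := by
  induction ls with
  | nil => intro d c; simp
  | cons cl ls ih =>
    intro d c
    simp only [List.foldl_cons, List.map_cons, List.sum_cons]
    rw [ih, inner_getD]
    by_cases hc : c = cl.1
    · subst hc
      simp [cntOf]
      ring
    · rw [if_neg hc, if_neg hc]
      ring

theorem outer_keys (p : String → Bool) (ls : List (String × List String)) :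
    ∀ (d : PySem.Dict String Int), (∀ cl ∈ ls, d.contains cl.1 = true) →
    (ls.foldl (fun d cl =>
        cl.2.foldl (fun d term => if p term then d.modify cl.1 0 (· + 1) else d) d) d).keys = d.keys := by
  induction ls with
  | nil => intro d _; rfl
  | cons cl ls ih =>
    intro d hd
    simp only [List.foldl_cons]
    have hk := inner_keys cl.1 p cl.2 d (hd cl (List.mem_cons_self ..))
    have hcont : ∀ cl' ∈ ls,
        (cl.2.foldl (fun d term => if p term then d.modify cl.1 0 (· + 1) else d) d).contains cl'.1 = true := by
      intro cl' hcl'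
      have hc' := hd cl' (List.mem_cons_of_mem _ hcl')
      rw [PySem.Dict.contains_iff_mem_keys] at hc' ⊢
      rw [hk]
      exact hc'
    rw [ih _ hcont, hk]

theorem insert0_getD (ls : List (String × List String)) :
    ∀ c, (ls.foldl (fun d cl => d.insert cl.1 (0 : Int)) PySem.Dict.empty).getD c 0 = 0 := by
  suffices h : ∀ (d : PySem.Dict String Int), (∀ k, d.getD k 0 = 0) →
      ∀ c, (ls.foldl (fun d cl => d.insert cl.1 (0 : Int)) d).getD c 0 = 0 by
    exact h _ (by simp)
  induction ls with
  | nil => intro d hd c; simpa using hd c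
  | cons cl ls ih =>
    intro d hd c
    simp only [List.foldl_cons]
    apply ih
    intro k
    rw [PySem.Dict.getD_insert]
    by_cases hk : k = cl.1
    · simp [hk]
    · simp [hk, hd k]

theorem filter_insert_items (l : List (String × Int)) :
    ∀ (d : PySem.Dict String Int),
      (∀ kv ∈ l, d.contains kv.1 = false) → (l.map (·.1)).Nodup →
      (l.foldl (fun d kv => if 0 < kv.2 then d.insert kv.1 kv.2 else d) d).items =
        d.items ++ l.filter (fun kv => 0 < kv.2) := by
  induction l with
  | nil => intro d _ _; simp
  | cons kv l ih =>
    intro d hd hnd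
    have hnd' : (kv.1 :: l.map (·.1)).Nodup := by simpa using hnd
    simp only [List.foldl_cons, List.filter_cons]
    by_cases hp : (0 : Int) < kv.2
    · rw [if_pos hp]
      rw [ih (d.insert kv.1 kv.2) ?_ hnd'.of_cons]
      · rw [PySem.Dict.items_insert_of_not_contains _ _ (hd kv (List.mem_cons_self ..))]
        simp [hp, List.append_assoc]
      · intro kv' hkv'
        rw [PySem.Dict.contains_insert]
        have h1 : kv'.1 ≠ kv.1 := by
          intro he
          exact (List.nodup_cons.mp hnd').1 (he ▸ List.mem_map.mpr ⟨kv', hkv', rfl⟩)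
        simp [h1, hd kv' (List.mem_cons_of_mem _ hkv')]
    · rw [if_neg hp]
      rw [ih d (fun kv' h => hd kv' (List.mem_cons_of_mem _ h)) hnd'.of_cons]
      simp [hp]

theorem generic_shape (p q : String → Bool)
    (h : ∀ cl ∈ CONCERN_LEXICON, ∀ t ∈ cl.2, p t = q t) :
    (CONCERN_LEXICON.map (fun cl => (cl.1, cntOf p cl.2))).filter (fun kv => 0 < kv.2) =
      (CONCERN_LEXICON.map (fun cl => (cl.1, cntOf q cl.2))).filter (fun kv => 0 < kv.2) := by
  have heq : CONCERN_LEXICON.map (fun cl => (cl.1, cntOf p cl.2)) =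
      CONCERN_LEXICON.map (fun cl => (cl.1, cntOf q cl.2)) := by
    apply List.map_congr_left
    intro cl hcl
    have hc : cl.2.countP p = cl.2.countP q := by
      rw [List.countP_eq_length_filter, List.countP_eq_length_filter,
        List.filter_congr (h cl hcl)]
    simp [cntOf, hc]
  rw [heq]

-- ===== the two programs in normal form =====

theorem A_normal (keywords : List String) :
    map_concerns_from_keywords keywords =
      (CONCERN_LEXICON.map (fun cl =>
        (cl.1, cntOf (fun term => PySem.Str.isIn (" " ++ PySem.Str.lower term ++ " ")
          (" " ++ PySem.Str.lower (PySem.Str.join " " keywords) ++ " ")) cl.2))).filter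
        (fun kv => 0 < kv.2) := by
  simp only [map_concerns_from_keywords]
  have h0 : (CONCERN_LEXICON.foldl (fun d cl => d.insert cl.1 (0 : Int)) PySem.Dict.empty).items
      = CONCERN_LEXICON.map (fun cl => (cl.1, (0 : Int))) := by
    rw [PySem.Dict.items_foldl_insert_fresh CONCERN_LEXICON (fun cl => cl.1) (fun _ => 0)
      PySem.Dict.empty (fun a _ => by simp) (by decide)]
    have hemp : PySem.Dict.empty.items = ([] : List (String × Int)) := rfl
    rw [hemp]
    simp
  have hkeys0 : (CONCERN_LEXICON.foldl (fun d cl => d.insert cl.1 (0 : Int)) PySem.Dict.empty).keys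
      = CONCERN_LEXICON.map (·.1) := by
    simp [PySem.Dict.keys, h0, List.map_map, Function.comp_def]
  have hcont0 : ∀ cl ∈ CONCERN_LEXICON,
      (CONCERN_LEXICON.foldl (fun d cl => d.insert cl.1 (0 : Int)) PySem.Dict.empty).contains cl.1 = true := by
    intro cl hcl
    rw [PySem.Dict.contains_iff_mem_keys, hkeys0]
    exact List.mem_map.mpr ⟨cl, hcl, rfl⟩
  have hkeysF := outer_keys
    (fun term => PySem.Str.isIn (" " ++ PySem.Str.lower term ++ " ")
      (" " ++ PySem.Str.lower (PySem.Str.join " " keywords) ++ " "))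
    CONCERN_LEXICON _ hcont0
  rw [hkeys0] at hkeysF
  have hnodup : (CONCERN_LEXICON.foldl (fun d cl =>
      cl.2.foldl (fun d term => if PySem.Str.isIn (" " ++ PySem.Str.lower term ++ " ")
        (" " ++ PySem.Str.lower (PySem.Str.join " " keywords) ++ " ") then d.modify cl.1 0 (· + 1) else d) d)
      (CONCERN_LEXICON.foldl (fun d cl => d.insert cl.1 (0 : Int)) PySem.Dict.empty)).keys.Nodup := by
    rw [hkeysF]; decide
  have hitems2 : (CONCERN_LEXICON.foldl (fun d cl =>
      cl.2.foldl (fun d term => if PySem.Str.isIn (" " ++ PySem.Str.lower term ++ " ")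
        (" " ++ PySem.Str.lower (PySem.Str.join " " keywords) ++ " ") then d.modify cl.1 0 (· + 1) else d) d)
      (CONCERN_LEXICON.foldl (fun d cl => d.insert cl.1 (0 : Int)) PySem.Dict.empty)).items =
      CONCERN_LEXICON.map (fun cl =>
        (cl.1, cntOf (fun term => PySem.Str.isIn (" " ++ PySem.Str.lower term ++ " ")
          (" " ++ PySem.Str.lower (PySem.Str.join " " keywords) ++ " ")) cl.2)) := by
    rw [PySem.Dict.items_eq_map_keys _ hnodup 0, hkeysF]
    simp only [outer_getD, insert0_getD, zero_add]
    simp [CONCERN_LEXICON, cntOf]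
  rw [hitems2]
  have hfst : ((CONCERN_LEXICON.map (fun cl =>
      (cl.1, cntOf (fun term => PySem.Str.isIn (" " ++ PySem.Str.lower term ++ " ")
        (" " ++ PySem.Str.lower (PySem.Str.join " " keywords) ++ " ")) cl.2))).map (·.1)).Nodup := by
    simp only [List.map_map, Function.comp_def]
    decide
  rw [filter_insert_items _ PySem.Dict.empty (fun kv _ => by simp) hfst]
  have hemp : PySem.Dict.empty.items = ([] : List (String × Int)) := rfl
  rw [hemp]
  simp

theorem B_normal (keywords : List String) :
    map_concerns_from_keywords_alt keywords =
      (CONCERN_LEXICON.map (fun cl =>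
        (cl.1, cntOf (fun term => PySem.Set.contains
          (gramsOf (PySem.Str.lower (PySem.Str.join " " keywords)).toList)
          (PySem.Str.lower term)) cl.2))).filter
        (fun kv => 0 < kv.2) := by
  simp only [map_concerns_from_keywords_alt]
  rw [tokens_eq]
  have hg : PySem.Set.update
      (PySem.Set.ofList (toks (PySem.Str.lower (PySem.Str.join " " keywords)).toList))
      (((toks (PySem.Str.lower (PySem.Str.join " " keywords)).toList).zip
        (PySem.List.slice (toks (PySem.Str.lower (PySem.Str.join " " keywords)).toList) (some 1))).map
          (fun ab => ab.1 ++ " " ++ ab.2)) =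
      gramsOf (PySem.Str.lower (PySem.Str.join " " keywords)).toList := rfl
  rw [hg]
  rw [PySem.List.foldl_append_ite
    (p := fun cl : String × List String => 0 <
      ((cl.2.filter (fun term => PySem.Set.contains
        (gramsOf (PySem.Str.lower (PySem.Str.join " " keywords)).toList)
        (PySem.Str.lower term))).length : Int))
    (f := fun cl : String × List String => (cl.1,
      ((cl.2.filter (fun term => PySem.Set.contains
        (gramsOf (PySem.Str.lower (PySem.Str.join " " keywords)).toList)
        (PySem.Str.lower term))).length : Int)))]
  rw [List.filter_map]
  simp [cntOf, List.countP_eq_length_filter, Function.comp_def]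

theorem tests_agree (keywords : List String) :
    ∀ cl ∈ CONCERN_LEXICON, ∀ t ∈ cl.2,
      (PySem.Str.isIn (" " ++ PySem.Str.lower t ++ " ")
        (" " ++ PySem.Str.lower (PySem.Str.join " " keywords) ++ " ")) =
      (PySem.Set.contains (gramsOf (PySem.Str.lower (PySem.Str.join " " keywords)).toList)
        (PySem.Str.lower t)) := by
  intro cl hcl t ht
  have hws : (" " : String).toList = [' '] := rfl
  have hm : (mySplit (PySem.Str.lower t).toList).length = 1 ∨
      (mySplit (PySem.Str.lower t).toList).length = 2 := by
    fin_cases hcl <;> fin_cases ht <;> decide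
  have hmain := test_master (PySem.Str.lower (PySem.Str.join " " keywords)).toList
    (PySem.Str.lower t) hm
  rw [← hmain]
  simp [hws]

theorem main_eq (keywords : List String) :
    map_concerns_from_keywords keywords = map_concerns_from_keywords_alt keywords := by
  rw [A_normal, B_normal]
  exact generic_shape _ _ (tests_agree keywords)

-- ===== VERDICT (by name: the statement is the Claim_ definition above) =====
theorem map_concerns_from_keywords_spec : Claim_equal_map_concerns_from_keywords := by
  intro keywords _
  unfold Spec_map_concerns_from_keywords
  exact main_eq keywords
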